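-- pv_equiv track=rewrite | github.com/Corendos/AdventOfCode2016 | Day1/Day1.py | computeNewPositionAndIntermediatePosition
-- ===== SOURCE A (Python) =====
-- def computeNewPositionAndIntermediatePosition(currentPosition, distance, newOrientation):
--     x, y = currentPosition
--     intermediatePosition = []
--     i = 1
--     if newOrientation == 'N':
--         while(i <= distance):
--             y += 1
--             intermediatePosition.append((x, y))
--             i += 1
--     elif newOrientation == 'W':
--         while (i <= distance):
--             x -= 1
--             intermediatePosition.append((x, y))
--             i += 1
--     elif newOrientation == 'S':
--         while (i <= distance):
--             y -= 1
--             intermediatePosition.append((x, y))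
--             i += 1
--     elif newOrientation == 'E':
--         while (i <= distance):
--             x += 1
--             intermediatePosition.append((x, y))
--             i += 1
--     return (x, y), intermediatePosition
-- ===== SOURCE B (Python) =====
-- def computeNewPositionAndIntermediatePosition(currentPosition, distance, newOrientation):
--     x, y = currentPosition
--     if newOrientation == 'N':
--         dx, dy = 0, 1
--     elif newOrientation == 'W':
--         dx, dy = -1, 0
--     elif newOrientation == 'S':
--         dx, dy = 0, -1
--     elif newOrientation == 'E':
--         dx, dy = 1, 0
--     else:
--         return (x, y), []
--     if distance < 1:
--         return (x, y), []
--     # jump straight to the destination, then walk BACKWARDS collecting the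
--     # visited cells in reverse order, and flip the list once at the end
--     fx, fy = x + dx * distance, y + dy * distance
--     rev = []
--     px, py = fx, fy
--     for _ in range(distance):
--         rev.append((px, py))
--         px -= dx
--         py -= dy
--     rev.reverse()
--     return (fx, fy), rev
-- ===== Notes on version B (the rewrite author's own statement) =====
-- stated objective: alternative
-- what changed: B computes the final position directly in closed form (x+dx*distance, y+dy*distance) and then builds the intermediate list back-to-front, walking backwards from the destination and reversing once, instead of A's four forward step-by-step accumulation loops that derive the final position as the last accumulated state.
import Mathlib
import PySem

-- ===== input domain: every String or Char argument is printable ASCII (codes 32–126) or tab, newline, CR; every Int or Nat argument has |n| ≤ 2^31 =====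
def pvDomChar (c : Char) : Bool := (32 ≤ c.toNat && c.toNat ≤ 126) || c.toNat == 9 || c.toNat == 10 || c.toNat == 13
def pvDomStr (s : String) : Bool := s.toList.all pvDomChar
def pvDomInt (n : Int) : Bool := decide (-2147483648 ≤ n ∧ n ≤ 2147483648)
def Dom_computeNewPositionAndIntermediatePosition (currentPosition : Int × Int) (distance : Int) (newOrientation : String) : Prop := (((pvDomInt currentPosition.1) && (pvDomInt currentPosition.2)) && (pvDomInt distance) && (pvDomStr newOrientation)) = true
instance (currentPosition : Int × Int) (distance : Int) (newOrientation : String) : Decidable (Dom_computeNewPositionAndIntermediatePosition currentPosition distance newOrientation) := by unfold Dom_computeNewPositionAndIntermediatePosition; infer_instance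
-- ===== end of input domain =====

-- B computes the final position in closed form and builds the intermediate list
-- back-to-front (walking backwards from the destination, reversing once), instead
-- of A's four forward step-by-step accumulation loops (objective: alternative).

-- ===== PORT A =====
-- the common shape of A's four while-loops: 'while i <= distance: x += dx; y += dy; append((x,y)); i += 1'
def pvAWhile (dx dy x y i distance : Int) (acc : List (Int × Int)) : (Int × Int) × (List (Int × Int)) :=
  if i ≤ distance then
    pvAWhile dx dy (x + dx) (y + dy) (i + 1) distance (acc ++ [(x + dx, y + dy)])
  else ((x, y), acc)
termination_by (distance + 1 - i).toNat
decreasing_by omega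

def computeNewPositionAndIntermediatePosition (currentPosition : Int × Int) (distance : Int) (newOrientation : String) : (Int × Int) × (List (Int × Int)) :=
  let x := currentPosition.1
  let y := currentPosition.2
  if newOrientation == "N" then pvAWhile 0 1 x y 1 distance []
  else if newOrientation == "W" then pvAWhile (-1) 0 x y 1 distance []
  else if newOrientation == "S" then pvAWhile 0 (-1) x y 1 distance []
  else if newOrientation == "E" then pvAWhile 1 0 x y 1 distance []
  else ((x, y), [])

-- ===== PORT B =====
-- B's backward walk: 'for _ in range(n): rev.append((px,py)); px -= dx; py -= dy'
def pvBack (dx dy : Int) : Nat → Int → Int → List (Int × Int) → List (Int × Int)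
  | 0, _, _, acc => acc
  | n + 1, px, py, acc => pvBack dx dy n (px - dx) (py - dy) (acc ++ [(px, py)])

def computeNewPositionAndIntermediatePosition_alt (currentPosition : Int × Int) (distance : Int) (newOrientation : String) : (Int × Int) × (List (Int × Int)) :=
  let x := currentPosition.1
  let y := currentPosition.2
  let dir? : Option (Int × Int) :=
    if newOrientation == "N" then some (0, 1)
    else if newOrientation == "W" then some (-1, 0)
    else if newOrientation == "S" then some (0, -1)
    else if newOrientation == "E" then some (1, 0)
    else none
  match dir? with
  | none => ((x, y), [])
  | some (dx, dy) =>
    if distance < 1 then ((x, y), [])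
    else
      let fx := x + dx * distance
      let fy := y + dy * distance
      let rev := pvBack dx dy distance.toNat fx fy []
      ((fx, fy), rev.reverse)

-- ===== PRECONDITION & SPEC =====
def Spec_computeNewPositionAndIntermediatePosition (currentPosition : Int × Int) (distance : Int) (newOrientation : String) (out : (Int × Int) × (List (Int × Int))) : Prop := out = computeNewPositionAndIntermediatePosition_alt currentPosition distance newOrientation
instance (currentPosition : Int × Int) (distance : Int) (newOrientation : String) (out : (Int × Int) × (List (Int × Int))) : Decidable (Spec_computeNewPositionAndIntermediatePosition currentPosition distance newOrientation out) := by unfold Spec_computeNewPositionAndIntermediatePosition; infer_instance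

-- ===== CLAIM (what is proved, stated in full; the proofs are below) =====
def Claim_equal_computeNewPositionAndIntermediatePosition : Prop := ∀ (currentPosition : Int × Int) (distance : Int) (newOrientation : String), Dom_computeNewPositionAndIntermediatePosition currentPosition distance newOrientation → Spec_computeNewPositionAndIntermediatePosition currentPosition distance newOrientation (computeNewPositionAndIntermediatePosition currentPosition distance newOrientation)

-- ===== LEMMAS AND PROOFS =====

-- A's loop, started at index i with position (x,y), yields the closed-form result.
theorem pvAWhile_eq (dx dy : Int) (n : Nat) : ∀ (x y i d : Int) (acc : List (Int × Int)), (d + 1 - i).toNat = n →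
    pvAWhile dx dy x y i d acc =
      ((x + dx * n, y + dy * n),
       acc ++ (PySem.List.pyRange i (d + 1) 1).map (fun j => (x + dx * (j - i + 1), y + dy * (j - i + 1)))) := by
  induction n with
  | zero =>
    intro x y i d acc h
    have hid : ¬ i ≤ d := by omega
    rw [pvAWhile, if_neg hid, PySem.List.pyRange_one_eq_nil (by omega)]
    simp
  | succ n ih =>
    intro x y i d acc h
    have hid : i ≤ d := by omega
    rw [pvAWhile, if_pos hid, ih (x + dx) (y + dy) (i + 1) d _ (by omega)]
    rw [PySem.List.pyRange_one_cons (by omega : i < d + 1)]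
    simp only [List.map_cons, List.append_assoc, List.singleton_append, Prod.mk.injEq]
    refine ⟨⟨by push_cast; ring, by push_cast; ring⟩, ?_⟩
    congr 1
    congr 1
    · simp only [Prod.mk.injEq]; exact ⟨by ring, by ring⟩
    · congr 1
      funext j
      simp only [Prod.mk.injEq]; exact ⟨by ring, by ring⟩

-- B's backward walk in closed form.
theorem pvBack_eq (dx dy : Int) (n : Nat) : ∀ (px py : Int) (acc : List (Int × Int)),
    pvBack dx dy n px py acc = acc ++ (List.range n).map (fun k : Nat => (px - dx * (k : Int), py - dy * (k : Int))) := by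
  induction n with
  | zero => intro px py acc; simp [pvBack]
  | succ n ih =>
    intro px py acc
    rw [pvBack, ih, List.range_succ_eq_map, List.map_cons, List.map_map,
        List.append_assoc, List.singleton_append]
    congr 2
    · simp
    · refine List.map_congr_left fun k _ => ?_
      simp only [Function.comp_apply, Prod.mk.injEq]
      push_cast
      exact ⟨by ring, by ring⟩

-- One direction branch: A's forward loop equals B's closed-form-plus-backward-walk.
theorem pvBranch_eq (dx dy x y d : Int) :
    pvAWhile dx dy x y 1 d [] =
      (if d < 1 then ((x, y), []) else
        ((x + dx * d, y + dy * d),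
         (pvBack dx dy d.toNat (x + dx * d) (y + dy * d) []).reverse)) := by
  by_cases hd : d < 1
  · rw [if_pos hd, pvAWhile, if_neg (by omega)]
  · rw [if_neg hd]
    rw [pvAWhile_eq dx dy d.toNat x y 1 d [] (by omega), pvBack_eq]
    have hdn : ((d.toNat : Int)) = d := by omega
    rw [hdn, List.nil_append, List.nil_append]
    congr 1
    apply List.ext_getElem
    · simp [PySem.List.length_pyRange_one]
    · intro j h1 h2
      simp only [List.length_map, PySem.List.length_pyRange_one] at h1
      have hj : j < d.toNat := by omega
      rw [List.getElem_map, PySem.List.getElem_pyRange_one, List.getElem_reverse,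
          List.getElem_map, List.getElem_range]
      simp only [List.length_map, List.length_range]
      have hc : ((d.toNat - 1 - j : Nat) : Int) = d - 1 - j := by omega
      rw [hc]
      simp only [Prod.mk.injEq]
      exact ⟨by ring, by ring⟩

-- ===== VERDICT (by name: the statement is the Claim_ definition above) =====
theorem computeNewPositionAndIntermediatePosition_spec : Claim_equal_computeNewPositionAndIntermediatePosition := by
  intro cp d o _
  unfold Spec_computeNewPositionAndIntermediatePosition
  unfold computeNewPositionAndIntermediatePosition computeNewPositionAndIntermediatePosition_alt
  by_cases hN : o == "N"
  · simp only [hN, if_pos]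
    exact pvBranch_eq 0 1 cp.1 cp.2 d
  · by_cases hW : o == "W"
    · simp only [hN, hW, if_pos, Bool.false_eq_true, ite_false]
      exact pvBranch_eq (-1) 0 cp.1 cp.2 d
    · by_cases hS : o == "S"
      · simp only [hN, hW, hS, Bool.false_eq_true, ite_false, ite_true]
        exact pvBranch_eq 0 (-1) cp.1 cp.2 d
      · by_cases hE : o == "E"
        · simp only [hN, hW, hS, hE, Bool.false_eq_true, ite_false, ite_true]
          exact pvBranch_eq 1 0 cp.1 cp.2 d
        · simp only [hN, hW, hS, hE, Bool.false_eq_true, ite_false]
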